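-- pv_equiv track=rewrite | github.com/aaronvstory/ReadySearch | api.py | _extract_country
-- ===== SOURCE A (Python) =====
-- def _extract_country(location: str) -> str:
--     """Extract country from location string."""
--     if not location or location == 'N/A':
--         return 'N/A'
--
--     countries = ['AUSTRALIA', 'UNITED KINGDOM', 'NEW ZEALAND', 'CANADA', 'USA']
--     location_parts = location.split()
--
--     for part in location_parts:
--         if part.upper() in countries:
--             return part.upper()
--
--     # Check for Australian territories
--     territories = ['NSW', 'VIC', 'QLD', 'SA', 'WA', 'NT', 'ACT', 'TAS']
--     for part in location_parts:
--         if part.upper() in territories: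
--             return 'AUSTRALIA'
--
--     return 'N/A'
-- ===== SOURCE B (Python) =====
-- def _extract_country(location: str) -> str:
--     """Extract country from location string (single-pass version)."""
--     if not location or location == 'N/A':
--         return 'N/A'
--
--     countries = {'AUSTRALIA', 'UNITED KINGDOM', 'NEW ZEALAND', 'CANADA', 'USA'}
--     territories = {'NSW', 'VIC', 'QLD', 'SA', 'WA', 'NT', 'ACT', 'TAS'}
--
--     country = None
--     has_territory = False
--     for part in location.split():
--         u = part.upper()
--         if country is None and u in countries:
--             country = u
--         has_territory = has_territory or u in territories
--
--     if country is not None: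
--         return country
--     return 'AUSTRALIA' if has_territory else 'N/A'
-- ===== Notes on version B (the rewrite author's own statement) =====
-- stated objective: alternative
-- what changed: Replaced A's two ordered full scans of the word list (countries first, then territories) by a single pass maintaining the first country match and a territory flag, resolving country-over-territory priority at return time.
import Mathlib
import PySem

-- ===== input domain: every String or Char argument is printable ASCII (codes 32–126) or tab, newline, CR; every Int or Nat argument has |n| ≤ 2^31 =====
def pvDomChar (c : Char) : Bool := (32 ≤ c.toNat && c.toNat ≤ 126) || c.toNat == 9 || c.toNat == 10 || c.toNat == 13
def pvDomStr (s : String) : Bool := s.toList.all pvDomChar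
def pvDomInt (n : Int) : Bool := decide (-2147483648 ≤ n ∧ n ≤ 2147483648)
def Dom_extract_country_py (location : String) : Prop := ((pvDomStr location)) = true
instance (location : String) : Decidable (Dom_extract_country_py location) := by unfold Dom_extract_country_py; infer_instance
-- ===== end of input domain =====

-- B replaces A's two ordered scans (countries, then territories) by one stateful pass; objective: alternative decomposition, same cost.

-- ===== PORT A =====
def pvCountries : List String := ["AUSTRALIA", "UNITED KINGDOM", "NEW ZEALAND", "CANADA", "USA"]
def pvTerritories : List String := ["NSW", "VIC", "QLD", "SA", "WA", "NT", "ACT", "TAS"]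

-- first loop of A: return part.upper() at the first country match
def pvLoopCountry : List String → Option String
  | [] => none
  | p :: rest =>
    if PySem.Str.upper p ∈ pvCountries then some (PySem.Str.upper p) else pvLoopCountry rest

-- second loop of A: return 'AUSTRALIA' at the first territory match
def pvLoopTerr : List String → Option String
  | [] => none
  | p :: rest =>
    if PySem.Str.upper p ∈ pvTerritories then some "AUSTRALIA" else pvLoopTerr rest

def extract_country_py (location : String) : String :=
  if location = "" ∨ location = "N/A" then "N/A"
  else
    let parts := PySem.Str.split₀ location
    match pvLoopCountry parts with
    | some c => c
    | none =>
      match pvLoopTerr parts with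
      | some a => a
      | none => "N/A"

-- ===== PORT B =====
-- B's single loop: carry the first country match and the territory flag, decide at the end
def pvScan : List String → Option String → Bool → String
  | [], country, terr =>
    (match country with
     | some c => c
     | none => if terr then "AUSTRALIA" else "N/A")
  | p :: rest, country, terr =>
    let u := PySem.Str.upper p
    pvScan rest (if country.isNone ∧ u ∈ pvCountries then some u else country)
                (terr || decide (u ∈ pvTerritories))

def extract_country_py_alt (location : String) : String :=
  if location = "" ∨ location = "N/A" then "N/A"
  else pvScan (PySem.Str.split₀ location) none false

-- ===== PRECONDITION & SPEC =====
def Spec_extract_country_py (location : String) (out : String) : Prop := out = extract_country_py_alt location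
instance (location : String) (out : String) : Decidable (Spec_extract_country_py location out) := by unfold Spec_extract_country_py; infer_instance

-- ===== CLAIM (what is proved, stated in full; the proofs are below) =====
def Claim_equal_extract_country_py : Prop := ∀ (location : String), Dom_extract_country_py location → Spec_extract_country_py location (extract_country_py location)

-- ===== LEMMAS AND PROOFS =====
theorem pvScan_eq (parts : List String) :
    ∀ (country : Option String) (terr : Bool),
    pvScan parts country terr =
      (match country with
       | some c => c
       | none =>
         match pvLoopCountry parts with
         | some c => c
         | none =>
           if terr then "AUSTRALIA"
           else match pvLoopTerr parts with
                | some a => a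
                | none => "N/A") := by
  induction parts with
  | nil =>
    intro country terr
    cases country <;> simp [pvScan, pvLoopCountry, pvLoopTerr]
  | cons p rest ih =>
    intro country terr
    cases country with
    | some c => simp [pvScan, ih]
    | none =>
      by_cases hc : PySem.Str.upper p ∈ pvCountries <;>
        by_cases ht : PySem.Str.upper p ∈ pvTerritories <;>
          simp [pvScan, pvLoopCountry, pvLoopTerr, hc, ht, ih] <;>
          first | (cases terr <;> simp) | skip

-- ===== VERDICT (by name: the statement is the Claim_ definition above) =====
theorem extract_country_py_spec : Claim_equal_extract_country_py := by
  intro location _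
  unfold Spec_extract_country_py extract_country_py extract_country_py_alt
  by_cases h : location = "" ∨ location = "N/A"
  · simp [h]
  · simp only [h, if_false]
    rw [pvScan_eq]
    cases hc : pvLoopCountry (PySem.Str.split₀ location) <;>
      cases ht : pvLoopTerr (PySem.Str.split₀ location) <;> simp
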